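-- pv_equiv track=rewrite | github.com/raeez/chiral-bar-cobar | compute/lib/cy_sheaf_categories_engine.py | hochschild_kuenneth
-- ===== SOURCE A (Python) =====
-- from typing import Dict, List, Optional, Tuple
--
-- def hochschild_kuenneth(
--     hh1: Dict[int, int],
--     hh2: Dict[int, int],
-- ) -> Dict[int, int]:
--     """Kuenneth product for Hochschild cohomology.
--
--     HH^n(X x Y) = bigoplus_{i+j=n} HH^i(X) tensor HH^j(Y).
--     """
--     result: Dict[int, int] = {}
--     for i, di in hh1.items():
--         for j, dj in hh2.items():
--             n = i + j
--             result[n] = result.get(n, 0) + di * dj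
--     return result
-- ===== SOURCE B (Python) =====
-- def hochschild_kuenneth(hh1, hh2):
--     """Gather convolution: enumerate the output degrees first, then compute each
--     coefficient by lookups into hh2 (instead of A's scatter-accumulate)."""
--     degrees = dict.fromkeys(i + j for i in hh1 for j in hh2)
--     return {n: sum(di * hh2.get(n - i, 0) for i, di in hh1.items()) for n in degrees}
-- ===== Notes on version B (the rewrite author's own statement) =====
-- stated objective: alternative
-- what changed: Replaces A's scatter-accumulate double loop (result[n] += di*dj into a growing dict) by a gather convolution: first enumerate the output degrees in first-occurrence order, then compute each coefficient as one sum of di * hh2.get(n - i, 0); Pre_ only excludes association lists whose hh2 keys repeat, which do not represent any Python dict.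
import Mathlib
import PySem

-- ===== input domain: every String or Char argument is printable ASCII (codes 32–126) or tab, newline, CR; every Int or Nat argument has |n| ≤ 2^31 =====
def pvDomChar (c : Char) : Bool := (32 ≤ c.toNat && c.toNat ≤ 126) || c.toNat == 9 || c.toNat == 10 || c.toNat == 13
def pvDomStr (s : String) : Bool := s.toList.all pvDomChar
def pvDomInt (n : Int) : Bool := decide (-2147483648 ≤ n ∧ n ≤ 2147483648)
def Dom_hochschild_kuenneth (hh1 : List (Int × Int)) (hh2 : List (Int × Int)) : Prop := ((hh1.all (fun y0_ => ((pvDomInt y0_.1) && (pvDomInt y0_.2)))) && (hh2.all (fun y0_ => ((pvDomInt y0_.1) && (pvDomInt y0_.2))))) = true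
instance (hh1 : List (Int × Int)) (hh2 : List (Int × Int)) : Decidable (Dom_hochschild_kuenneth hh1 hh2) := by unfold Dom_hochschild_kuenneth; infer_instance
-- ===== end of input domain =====

-- B replaces A's scatter-accumulate dict loop by a gather convolution (degree list first,
-- then one lookup-sum per degree); same result, an alternative decomposition, not faster.


-- ===== PORT A =====
def hochschild_kuenneth (hh1 : List (Int × Int)) (hh2 : List (Int × Int)) : List (Int × Int) :=
  (hh1.foldl (fun result p =>
      hh2.foldl (fun result q =>
        result.insert (p.1 + q.1) (result.getD (p.1 + q.1) 0 + p.2 * q.2)) result)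
    PySem.Dict.empty).items

-- ===== PORT B =====
def hochschild_kuenneth_alt (hh1 : List (Int × Int)) (hh2 : List (Int × Int)) : List (Int × Int) :=
  (PySem.List.dedup (hh1.flatMap (fun p => hh2.map (fun q => p.1 + q.1)))).map
    (fun n => (n, (hh1.map (fun p => p.2 * (PySem.Dict.mk hh2).getD (n - p.1) 0)).sum))

-- ===== PRECONDITION & SPEC =====
-- Pre_ excludes hh2 association lists with repeated keys: those do not represent any Python
-- dict (A sums over every entry while a dict lookup sees only the first), so the corner is
-- an artefact of the list encoding, not an input Python A ever receives.
def Pre_hochschild_kuenneth (hh1 : List (Int × Int)) (hh2 : List (Int × Int)) : Prop :=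
  (hh2.map Prod.fst).Nodup
instance (hh1 : List (Int × Int)) (hh2 : List (Int × Int)) : Decidable (Pre_hochschild_kuenneth hh1 hh2) := by unfold Pre_hochschild_kuenneth; infer_instance
def pvWitness_hochschild_kuenneth : (List (Int × Int)) × (List (Int × Int)) :=
  ([(0, 1), (1, 2)], [(0, 1), (2, 3)])
def Spec_hochschild_kuenneth (hh1 : List (Int × Int)) (hh2 : List (Int × Int)) (out : List (Int × Int)) : Prop := out = hochschild_kuenneth_alt hh1 hh2
instance (hh1 : List (Int × Int)) (hh2 : List (Int × Int)) (out : List (Int × Int)) : Decidable (Spec_hochschild_kuenneth hh1 hh2 out) := by unfold Spec_hochschild_kuenneth; infer_instance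

-- ===== CLAIM (what is proved, stated in full; the proofs are below) =====
def Claim_equal_hochschild_kuenneth : Prop := ∀ (hh1 : List (Int × Int)) (hh2 : List (Int × Int)), Dom_hochschild_kuenneth hh1 hh2 → Pre_hochschild_kuenneth hh1 hh2 → Spec_hochschild_kuenneth hh1 hh2 (hochschild_kuenneth hh1 hh2)

-- ===== LEMMAS AND PROOFS =====

-- the flattened list of (degree, contribution) pairs A scatters over
def pvPairs (hh1 : List (Int × Int)) (hh2 : List (Int × Int)) : List (Int × Int) :=
  hh1.flatMap (fun p => hh2.map (fun q => (p.1 + q.1, p.2 * q.2)))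

lemma hk_eq_scatter (hh1 hh2 : List (Int × Int)) :
    hochschild_kuenneth hh1 hh2 =
      ((pvPairs hh1 hh2).foldl
        (fun d e => d.insert e.1 (d.getD e.1 0 + e.2)) PySem.Dict.empty).items := by
  simp [hochschild_kuenneth, pvPairs, List.foldl_flatMap, List.foldl_map]

lemma getD_scatter (l : List (Int × Int)) (d : PySem.Dict Int Int) (k : Int) :
    (l.foldl (fun d e => d.insert e.1 (d.getD e.1 0 + e.2)) d).getD k 0
      = d.getD k 0 + ((l.filter (fun e => e.1 == k)).map (·.2)).sum := by
  induction l generalizing d with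
  | nil => simp
  | cons a t ih =>
    simp only [List.foldl_cons, ih, List.filter_cons]
    rw [PySem.Dict.getD_insert]
    by_cases h : a.1 = k
    · subst h; simp; ring
    · simp [h, Ne.symm h]

lemma getD_mk_filter (l : List (Int × Int)) (hnd : (l.map Prod.fst).Nodup) (k : Int) :
    (PySem.Dict.mk l).getD k 0 = ((l.filter (fun e => e.1 == k)).map (·.2)).sum := by
  induction l with
  | nil => simp [PySem.Dict.getD, PySem.Dict.get?]
  | cons a t ih =>
    simp only [List.map_cons, List.nodup_cons] at hnd
    rw [PySem.Dict.getD_eq_get?_getD, PySem.Dict.get?_mk_cons, List.filter_cons]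
    by_cases h : a.1 = k
    · have ht : t.filter (fun e => e.1 == k) = [] := by
        rw [List.filter_eq_nil_iff]
        intro e he hek
        exact hnd.1 (h ▸ (beq_iff_eq.mp hek) ▸ List.mem_map_of_mem he)
      simp [h, ht]
    · simp only [beq_iff_eq, h, if_false]
      rw [← PySem.Dict.getD_eq_get?_getD, ih hnd.2]

-- ===== VERDICT (by name: the statement is the Claim_ definition above) =====
theorem hochschild_kuenneth_spec : Claim_equal_hochschild_kuenneth := by
  intro hh1 hh2 _ hpre
  unfold Spec_hochschild_kuenneth hochschild_kuenneth_alt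
  rw [hk_eq_scatter]
  have hnodup : ((pvPairs hh1 hh2).foldl
      (fun d e => d.insert e.1 (d.getD e.1 0 + e.2)) PySem.Dict.empty).keys.Nodup := by
    have := PySem.Dict.nodup_keys_foldl_insert_key (pvPairs hh1 hh2) Prod.fst
      (fun d e => d.getD e.1 0 + e.2) PySem.Dict.empty (by simp)
    simpa using this
  have hkeys : ((pvPairs hh1 hh2).foldl
      (fun d e => d.insert e.1 (d.getD e.1 0 + e.2)) PySem.Dict.empty).keys
      = PySem.List.dedup (hh1.flatMap (fun p => hh2.map (fun q => p.1 + q.1))) := by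
    have := PySem.Dict.keys_foldl_insert_key (pvPairs hh1 hh2) Prod.fst
      (fun d e => d.getD e.1 0 + e.2) PySem.Dict.empty
    simp only [PySem.Dict.keys_empty, PySem.Set.update_nil_left] at this
    rw [this, PySem.List.dedup_eq_ofList]
    congr 1
    simp [pvPairs, List.map_flatMap, List.map_map, Function.comp_def]
  rw [PySem.Dict.items_eq_map_keys _ hnodup 0, hkeys]
  apply List.map_congr_left
  intro n _
  rw [getD_scatter]
  simp only [PySem.Dict.getD_empty, zero_add]
  congr 1
  -- per-degree coefficient: filtered scatter sum = gather sum of lookups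
  have hnd : (hh2.map Prod.fst).Nodup := hpre
  simp only [pvPairs, List.filter_flatMap, List.map_flatMap]
  rw [List.flatMap_def, List.sum_flatten, List.map_map]
  refine congrArg List.sum (List.map_congr_left ?_)
  intro p _
  simp only [Function.comp]
  rw [List.filter_map]
  have hcond : ∀ q ∈ hh2,
      ((fun e : Int × Int => e.1 == n) ∘ (fun q : Int × Int => (p.1 + q.1, p.2 * q.2))) q
        = (fun e : Int × Int => e.1 == n - p.1) q := by
    intro q _
    simp only [Function.comp]
    rw [Bool.eq_iff_iff]
    simp only [beq_iff_eq]
    omega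
  rw [List.filter_congr hcond, List.map_map]
  have hsnd : ((fun x : Int × Int => x.2) ∘ fun q : Int × Int => (p.1 + q.1, p.2 * q.2))
      = fun q : Int × Int => p.2 * q.2 := rfl
  rw [hsnd, getD_mk_filter hh2 hnd (n - p.1)]
  exact PySem.List.sum_map_const_mul_int (hh2.filter (fun e => e.1 == n - p.1)) p.2 (·.2)
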